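-- pv_equiv track=rewrite | github.com/karunakarAJ/DNLI-I-0001-MMR | scripts/gen_corrected_figs.py | get_dose_schedule
-- ===== SOURCE A (Python) =====
-- TRTDUR = {
--     '0016-9001': 97, '0016-9003': 97, '0017-9001': 95, '0017-9002': 91,
--     '0016-9004': 75, '0017-9003': 71, '2064-9002': 69, '2065-9002': 65,
--     '0016-9005': 45, '0016-9006': 43, '0017-9005': 41, '0017-9007': 39,
--     '0017-9008': 37, '2064-9003': 35, '2064-9004': 33, '2064-9005': 31,
--     '2065-9001': 27, '2065-9004': 25,
--     '0017-9004': 55, '0017-9006': 47,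
-- }
--
-- def get_dose_schedule(subj, cohort):
--     """Return dict {visit_week: dose_label} per protocol V6."""
--     schedule = {}
--     dur = TRTDUR[subj]
--     if cohort == 'Cohort A1':
--         for w in [1, 2]:
--             if w <= dur: schedule[w] = '3 mg/kg'
--         w = 3
--         while w <= dur:
--             schedule[w] = '10 mg/kg'
--             w += 2
--     elif cohort == 'Cohort A2':
--         for w in [1, 2]:
--             if w <= dur: schedule[w] = '3 mg/kg'
--         w = 3
--         while w <= min(dur, 24):
--             schedule[w] = '3 mg/kg'; w += 2
--         w = 25
--         while w <= min(dur, 48):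
--             schedule[w] = '6 mg/kg'; w += 2
--         w = 49
--         while w <= dur:
--             schedule[w] = '10 mg/kg'; w += 2
--     elif cohort in ('Cohort A3', 'Cohort B1'):
--         for w in range(1, min(7, dur + 1)):
--             schedule[w] = '3 mg/kg'
--         for w in range(7, min(13, dur + 1)):
--             schedule[w] = '6 mg/kg'
--         for w in range(13, dur + 1):
--             schedule[w] = '10 mg/kg'
--     return schedule
-- ===== SOURCE B (Python) =====
-- TRTDUR = {
--     '0016-9001': 97, '0016-9003': 97, '0017-9001': 95, '0017-9002': 91,
--     '0016-9004': 75, '0017-9003': 71, '2064-9002': 69, '2065-9002': 65,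
--     '0016-9005': 45, '0016-9006': 43, '0017-9005': 41, '0017-9007': 39,
--     '0017-9008': 37, '2064-9003': 35, '2064-9004': 33, '2064-9005': 31,
--     '2065-9001': 27, '2065-9004': 25,
--     '0017-9004': 55, '0017-9006': 47,
-- }
--
-- def get_dose_schedule(subj, cohort):
--     """Return dict {visit_week: dose_label}: classify every week 1..dur by a
--     dosing predicate (is week w a dosing week?) and a dose classifier (which
--     label applies at week w?), instead of filling ranges."""
--     dur = TRTDUR[subj]
--     if cohort in ('Cohort A1', 'Cohort A2'):
--         # weekly loading for weeks 1-2, then every other week (odd weeks)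
--         def dosed(w):
--             return w <= 2 or w % 2 == 1
--         if cohort == 'Cohort A1':
--             cuts = [(2, '3 mg/kg')]
--         else:
--             cuts = [(24, '3 mg/kg'), (48, '6 mg/kg')]
--     elif cohort in ('Cohort A3', 'Cohort B1'):
--         def dosed(w):
--             return True
--         cuts = [(6, '3 mg/kg'), (12, '6 mg/kg')]
--     else:
--         return {}
--
--     def label(w):
--         for cut, dose in cuts:
--             if w <= cut:
--                 return dose
--         return '10 mg/kg'
--
--     return {w: label(w) for w in range(1, dur + 1) if dosed(w)}
-- ===== Notes on version B (the rewrite author's own statement) =====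
-- stated objective: alternative
-- what changed: Instead of filling the dict band by band with prefix loops and while-loops, B makes one pass over all weeks 1..dur and classifies each week by a per-cohort dosing predicate (weeks 1-2 or odd vs every week) plus a threshold classifier that picks the dose label.
import Mathlib
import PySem

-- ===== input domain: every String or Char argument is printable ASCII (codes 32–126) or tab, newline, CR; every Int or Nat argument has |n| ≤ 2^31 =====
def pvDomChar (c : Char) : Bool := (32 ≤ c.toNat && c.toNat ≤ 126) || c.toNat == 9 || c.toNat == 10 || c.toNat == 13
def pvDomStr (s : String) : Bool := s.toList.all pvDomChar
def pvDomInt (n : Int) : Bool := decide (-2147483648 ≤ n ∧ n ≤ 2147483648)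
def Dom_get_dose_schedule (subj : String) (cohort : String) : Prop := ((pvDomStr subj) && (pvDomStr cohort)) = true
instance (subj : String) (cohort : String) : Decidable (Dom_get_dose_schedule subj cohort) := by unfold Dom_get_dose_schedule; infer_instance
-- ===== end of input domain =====

-- B replaces A's per-cohort band-filling loops by a single pass over weeks 1..dur with a
-- per-cohort dosing predicate and a threshold classifier for the label (objective: alternative).


-- ===== PORT A =====
-- the module-level TRTDUR dict, shared by both programs
def pvTRTDUR : PySem.Dict String Int := PySem.Dict.ofList
  [("0016-9001", 97), ("0016-9003", 97), ("0017-9001", 95), ("0017-9002", 91),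
   ("0016-9004", 75), ("0017-9003", 71), ("2064-9002", 69), ("2065-9002", 65),
   ("0016-9005", 45), ("0016-9006", 43), ("0017-9005", 41), ("0017-9007", 39),
   ("0017-9008", 37), ("2064-9003", 35), ("2064-9004", 33), ("2064-9005", 31),
   ("2065-9001", 27), ("2065-9004", 25),
   ("0017-9004", 55), ("0017-9006", 47)]

-- A's 'while w <= bound: schedule[w] = label; w += 2' loops; fuel only guards termination
def pvWhileDose (fuel : Nat) (w bound : Int) (label : String) (sched : PySem.Dict Int String) : PySem.Dict Int String :=
  match fuel with
  | 0 => sched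
  | f + 1 => if w ≤ bound then pvWhileDose f (w + 2) bound label (sched.insert w label) else sched

def get_dose_schedule (subj : String) (cohort : String) : List (Int × String) :=
  match pvTRTDUR.get? subj with
  | none => []  -- KeyError in Python: excluded by Pre_
  | some dur =>
    let schedule : PySem.Dict Int String := PySem.Dict.empty
    let schedule :=
      if cohort == "Cohort A1" then
        let schedule := ([1, 2] : List Int).foldl
          (fun s w => if w ≤ dur then s.insert w "3 mg/kg" else s) schedule
        pvWhileDose (dur + 2 - 3).toNat 3 dur "10 mg/kg" schedule
      else if cohort == "Cohort A2" then
        let schedule := ([1, 2] : List Int).foldl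
          (fun s w => if w ≤ dur then s.insert w "3 mg/kg" else s) schedule
        let schedule := pvWhileDose (min dur 24 + 2 - 3).toNat 3 (min dur 24) "3 mg/kg" schedule
        let schedule := pvWhileDose (min dur 48 + 2 - 25).toNat 25 (min dur 48) "6 mg/kg" schedule
        pvWhileDose (dur + 2 - 49).toNat 49 dur "10 mg/kg" schedule
      else if cohort == "Cohort A3" || cohort == "Cohort B1" then
        let schedule := (PySem.List.pyRange 1 (min 7 (dur + 1)) 1).foldl
          (fun s w => s.insert w "3 mg/kg") schedule
        let schedule := (PySem.List.pyRange 7 (min 13 (dur + 1)) 1).foldl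
          (fun s w => s.insert w "6 mg/kg") schedule
        (PySem.List.pyRange 13 (dur + 1) 1).foldl
          (fun s w => s.insert w "10 mg/kg") schedule
      else schedule
    schedule.items

-- ===== PORT B =====
-- Source B's 'label' helper: first threshold cut that admits w, else 10 mg/kg
def pvLabel (cuts : List (Int × String)) (w : Int) : String :=
  match cuts with
  | [] => "10 mg/kg"
  | (c, d) :: rest => if w ≤ c then d else pvLabel rest w

def get_dose_schedule_alt (subj : String) (cohort : String) : List (Int × String) :=
  match pvTRTDUR.get? subj with
  | none => []
  | some dur =>
    if cohort == "Cohort A1" || cohort == "Cohort A2" then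
      let dosed : Int → Bool := fun w => w ≤ 2 || w % 2 == 1
      let cuts : List (Int × String) :=
        if cohort == "Cohort A1" then [(2, "3 mg/kg")]
        else [(24, "3 mg/kg"), (48, "6 mg/kg")]
      (((PySem.List.pyRange 1 (dur + 1) 1).filter dosed).foldl
        (fun s w => s.insert w (pvLabel cuts w)) (PySem.Dict.empty : PySem.Dict Int String)).items
    else if cohort == "Cohort A3" || cohort == "Cohort B1" then
      let dosed : Int → Bool := fun _ => true
      let cuts : List (Int × String) := [(6, "3 mg/kg"), (12, "6 mg/kg")]
      (((PySem.List.pyRange 1 (dur + 1) 1).filter dosed).foldl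
        (fun s w => s.insert w (pvLabel cuts w)) (PySem.Dict.empty : PySem.Dict Int String)).items
    else []

-- ===== PRECONDITION & SPEC =====
-- Pre_ excludes exactly the subjects not in TRTDUR, on which Python A raises KeyError.
def Pre_get_dose_schedule (subj : String) (cohort : String) : Prop :=
  subj ∈ ["0016-9001", "0016-9003", "0017-9001", "0017-9002",
          "0016-9004", "0017-9003", "2064-9002", "2065-9002",
          "0016-9005", "0016-9006", "0017-9005", "0017-9007",
          "0017-9008", "2064-9003", "2064-9004", "2064-9005",
          "2065-9001", "2065-9004", "0017-9004", "0017-9006"]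
instance (subj : String) (cohort : String) : Decidable (Pre_get_dose_schedule subj cohort) := by
  unfold Pre_get_dose_schedule; infer_instance

def pvWitness_get_dose_schedule : String × String := ("0016-9001", "Cohort A1")

def Spec_get_dose_schedule (subj : String) (cohort : String) (out : List (Int × String)) : Prop := out = get_dose_schedule_alt subj cohort
instance (subj : String) (cohort : String) (out : List (Int × String)) : Decidable (Spec_get_dose_schedule subj cohort out) := by unfold Spec_get_dose_schedule; infer_instance

-- ===== CLAIM (what is proved, stated in full; the proofs are below) =====
def Claim_equal_get_dose_schedule : Prop := ∀ (subj : String) (cohort : String), Dom_get_dose_schedule subj cohort → Pre_get_dose_schedule subj cohort → Spec_get_dose_schedule subj cohort (get_dose_schedule subj cohort)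

-- ===== LEMMAS AND PROOFS =====

-- neither program inspects the cohort beyond the four literal tests: all other cohorts give {}
theorem pv_unmatched (subj cohort : String)
    (h1 : cohort ≠ "Cohort A1") (h2 : cohort ≠ "Cohort A2")
    (h3 : cohort ≠ "Cohort A3") (h4 : cohort ≠ "Cohort B1") :
    get_dose_schedule subj cohort = get_dose_schedule_alt subj cohort := by
  unfold get_dose_schedule get_dose_schedule_alt
  cases pvTRTDUR.get? subj with
  | none => rfl
  | some dur => simp [h1, h2, h3, h4, PySem.Dict.empty, PySem.Dict.items]

-- ===== VERDICT (by name: the statement is the Claim_ definition above) =====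
set_option maxRecDepth 8192 in
set_option maxHeartbeats 2000000 in
theorem get_dose_schedule_spec : Claim_equal_get_dose_schedule := by
  intro subj cohort _ hpre
  unfold Spec_get_dose_schedule
  have hs := hpre
  unfold Pre_get_dose_schedule at hs
  simp only [List.mem_cons, List.not_mem_nil, or_false] at hs
  by_cases h1 : cohort = "Cohort A1"
  · subst h1; rcases hs with rfl | rfl | rfl | rfl | rfl | rfl | rfl | rfl | rfl | rfl | rfl | rfl | rfl | rfl | rfl | rfl | rfl | rfl | rfl | rfl <;> decide
  by_cases h2 : cohort = "Cohort A2"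
  · subst h2; rcases hs with rfl | rfl | rfl | rfl | rfl | rfl | rfl | rfl | rfl | rfl | rfl | rfl | rfl | rfl | rfl | rfl | rfl | rfl | rfl | rfl <;> decide
  by_cases h3 : cohort = "Cohort A3"
  · subst h3; rcases hs with rfl | rfl | rfl | rfl | rfl | rfl | rfl | rfl | rfl | rfl | rfl | rfl | rfl | rfl | rfl | rfl | rfl | rfl | rfl | rfl <;> decide
  by_cases h4 : cohort = "Cohort B1"
  · subst h4; rcases hs with rfl | rfl | rfl | rfl | rfl | rfl | rfl | rfl | rfl | rfl | rfl | rfl | rfl | rfl | rfl | rfl | rfl | rfl | rfl | rfl <;> decide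
  exact pv_unmatched subj cohort h1 h2 h3 h4
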